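-- pv_equiv track=rewrite | github.com/afni/afni | src/python_scripts/afnipy/lib_format_cmd_str.py | make_big_list_from_args
-- ===== SOURCE A (Python) =====
-- AD = { \
--        'quote_pair_list'   : [ "'", '"' ],
--        'list_cmd_args' : [],
--        'maxcount'      : 10**6,
--        'nindent'       : 4,
--        'max_lw'        : 78,
--        'max_harg1'     : 40,
--        'comment_start' : None,
--        'verb'          : 0,
-- }
--
-- def make_big_list_from_args(arg_list,
--                             list_cmd_args=AD['list_cmd_args']):
--     '''Take the arge list already passed through whitespace splitting and
--     quote-pairing and make a 'big_list' of the opts.  Namely, return a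
--     list of sub-lists, where the [0]th list is the program name and
--     each subsequent list will contain an option and any args for it.
--
--     In this function, the determination of a new sub-list is made
--     using a provided list of args.
--
--     See make_big_list_auto(...) if you don't know the opt names for
--     the program and want to split arg_list into sublists using some
--     reasonable/automated logic.
--     '''
--
--     # initialize list: [0]th item should be program name
--     big_list  = [[arg_list[0]]]
--     mini_list = []
--     i = 1
--     N = len(arg_list)
--
--     while i < N :
--         iarg = arg_list[i]
--         narg = len(iarg)
--         if iarg in list_cmd_args :
--             # looks like new opt: store any existing (non-empty)
--             # mini_list, and start new one with this str
--             if mini_list :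
--                 big_list.append(mini_list)
--             mini_list = [iarg]
--         elif mini_list :
--             # otherwise, if a mini_list exists, keep adding to it
--             mini_list.append(iarg)
--         else:
--             # otherwise, there is no mini_list and this looks like an
--             # arg-by-position: is its own mini_list
--             big_list.append([iarg])
--         i+= 1
--     if mini_list :
--         # add any remaining mini_list
--         big_list.append(mini_list)
--
--     return big_list
-- ===== SOURCE B (Python) =====
-- AD = { \
--        'quote_pair_list'   : [ "'", '"' ],
--        'list_cmd_args' : [],
--        'maxcount'      : 10**6,
--        'nindent'       : 4,
--        'max_lw'        : 78,
--        'max_harg1'     : 40,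
--        'comment_start' : None,
--        'verb'          : 0,
-- }
--
-- def make_big_list_from_args(arg_list,
--                             list_cmd_args=AD['list_cmd_args']):
--     '''Right-to-left re-implementation: scan the tail backwards, emitting a
--     finished group each time an option token is met; tokens left pending at
--     the front (before any option) are positional singletons.'''
--     groups  = []
--     pending = []
--     for tok in reversed(arg_list[1:]):
--         if tok in list_cmd_args:
--             groups.append([tok] + pending[::-1])
--             pending = []
--         else:
--             pending.append(tok)
--     head = [[arg_list[0]]] + [[t] for t in reversed(pending)]
--     return head + groups[::-1]
-- ===== Notes on version B (the rewrite author's own statement) =====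
-- stated objective: alternative
-- what changed: B scans the argument tail right-to-left, emitting a complete group whenever an option token is met and turning the tokens still pending at the front into positional singletons, instead of A's left-to-right streaming mini_list with flush-on-new-option and flush-at-end logic.
-- outside the precondition, e.g. on make_big_list_from_args([], ['-a']): A raises IndexError, B raises IndexError
import Mathlib
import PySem

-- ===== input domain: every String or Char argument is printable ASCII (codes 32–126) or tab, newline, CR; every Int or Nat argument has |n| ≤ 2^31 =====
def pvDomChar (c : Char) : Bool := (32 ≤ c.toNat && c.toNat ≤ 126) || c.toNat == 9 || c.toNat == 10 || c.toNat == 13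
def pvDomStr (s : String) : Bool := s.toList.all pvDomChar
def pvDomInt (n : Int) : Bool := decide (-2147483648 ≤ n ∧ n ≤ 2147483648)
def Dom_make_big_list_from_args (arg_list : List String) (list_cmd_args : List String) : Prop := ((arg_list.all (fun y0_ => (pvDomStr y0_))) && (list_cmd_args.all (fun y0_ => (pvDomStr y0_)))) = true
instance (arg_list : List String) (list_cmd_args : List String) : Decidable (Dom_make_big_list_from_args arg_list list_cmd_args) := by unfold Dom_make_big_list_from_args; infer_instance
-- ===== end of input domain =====

-- B replaces A's streaming mini_list/flush accumulation by a right-to-left scan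
-- that emits a complete group at each option token (objective: alternative).
-- Both A and B raise IndexError on an empty arg_list; Pre_ excludes exactly that.

-- ===== PORT A =====
-- the while-loop of A: carries (big_list, mini_list); the final flush is done by the caller
def pvLoopA (lca : List String) : List String → List (List String) → List String → List (List String) × List String
  | [], big, mini => (big, mini)
  | iarg :: rest, big, mini =>
    if lca.contains iarg then
      pvLoopA lca rest (if mini.isEmpty then big else big ++ [mini]) [iarg]
    else if !mini.isEmpty then
      pvLoopA lca rest big (mini ++ [iarg])
    else
      pvLoopA lca rest (big ++ [[iarg]]) mini

def make_big_list_from_args (arg_list : List String) (list_cmd_args : List String) : List (List String) :=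
  match arg_list with
  | [] => []   -- unreachable under Pre_ (Python raises IndexError on arg_list[0])
  | a0 :: rest =>
    let st := pvLoopA list_cmd_args rest [[a0]] []
    if st.2.isEmpty then st.1 else st.1 ++ [st.2]

-- ===== PORT B =====
-- one step of B's loop over reversed(arg_list[1:]): state = (groups, pending)
def pvStepB (lca : List String) (st : List (List String) × List String) (tok : String) : List (List String) × List String :=
  if lca.contains tok then (st.1 ++ [[tok] ++ st.2.reverse], [])
  else (st.1, st.2 ++ [tok])

def make_big_list_from_args_alt (arg_list : List String) (list_cmd_args : List String) : List (List String) :=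
  match arg_list with
  | [] => []   -- unreachable under Pre_ (Python raises IndexError on arg_list[0])
  | a0 :: tl =>
    let st := tl.reverse.foldl (pvStepB list_cmd_args) ([], [])
    ([[a0]] ++ st.2.reverse.map (fun t => [t])) ++ st.1.reverse

-- ===== PRECONDITION & SPEC =====
-- Pre_ excludes the empty arg_list, on which both Pythons raise IndexError at arg_list[0].
def Pre_make_big_list_from_args (arg_list : List String) (list_cmd_args : List String) : Prop := arg_list ≠ []
instance (arg_list : List String) (list_cmd_args : List String) : Decidable (Pre_make_big_list_from_args arg_list list_cmd_args) := by unfold Pre_make_big_list_from_args; infer_instance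
def pvWitness_make_big_list_from_args : List String × List String := (["prog", "x", "-a", "1", "-b"], ["-a", "-b"])

def Spec_make_big_list_from_args (arg_list : List String) (list_cmd_args : List String) (out : List (List String)) : Prop := out = make_big_list_from_args_alt arg_list list_cmd_args
instance (arg_list : List String) (list_cmd_args : List String) (out : List (List String)) : Decidable (Spec_make_big_list_from_args arg_list list_cmd_args out) := by unfold Spec_make_big_list_from_args; infer_instance

-- ===== CLAIM (what is proved, stated in full; the proofs are below) =====
def Claim_equal_make_big_list_from_args : Prop := ∀ (arg_list : List String) (list_cmd_args : List String), Dom_make_big_list_from_args arg_list list_cmd_args → Pre_make_big_list_from_args arg_list list_cmd_args → Spec_make_big_list_from_args arg_list list_cmd_args (make_big_list_from_args arg_list list_cmd_args)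

-- ===== LEMMAS AND PROOFS =====

-- the flushed result of A's loop equals B's right-to-left state, for any carried (big, mini)
lemma pvLoop_eq (lca : List String) (tail : List String) :
    ∀ (big : List (List String)) (mini : List String),
      (let st := pvLoopA lca tail big mini
       if st.2.isEmpty then st.1 else st.1 ++ [st.2]) =
      (let r := tail.reverse.foldl (pvStepB lca) ([], [])
       if mini.isEmpty then big ++ r.2.reverse.map (fun t => [t]) ++ r.1.reverse
       else big ++ [mini ++ r.2.reverse] ++ r.1.reverse) := by
  induction tail with
  | nil =>
    intro big mini
    cases mini <;> simp [pvLoopA]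
  | cons x rest ih =>
    intro big mini
    have hrev : (x :: rest).reverse = rest.reverse ++ [x] := by simp
    simp only [hrev, List.foldl_append, List.foldl]
    by_cases hx : lca.contains x
    · have h1 := ih (if mini.isEmpty then big else big ++ [mini]) [x]
      cases hm : mini.isEmpty <;>
        simp_all [pvLoopA, pvStepB, List.isEmpty_iff] <;>
        cases (rest.reverse.foldl (pvStepB lca) ([], [])) <;> simp_all
    · by_cases hm : mini.isEmpty
      · have h1 := ih (big ++ [[x]]) mini
        have hm' : mini = [] := List.isEmpty_iff.mp hm
        simp_all [pvLoopA, pvStepB]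
        try (cases (rest.reverse.foldl (pvStepB lca) ([], [])) <;> simp_all)
      · have h1 := ih big (mini ++ [x])
        simp_all [pvLoopA, pvStepB]
  
-- ===== VERDICT (by name: the statement is the Claim_ definition above) =====
theorem make_big_list_from_args_spec : Claim_equal_make_big_list_from_args := by
  intro arg_list list_cmd_args _ hpre
  unfold Spec_make_big_list_from_args
  match arg_list with
  | [] => exact absurd rfl hpre
  | a0 :: tl =>
    have h := pvLoop_eq list_cmd_args tl [[a0]] []
    simpa [make_big_list_from_args, make_big_list_from_args_alt] using h
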